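-- pv_equiv track=rewrite | github.com/cecilia-uu/LeetCode | OA/meta/17_square_frame.py | solution
-- ===== SOURCE A (Python) =====
-- def solution(board):
--     rows = len(board)
--     cols = len(board[0])
--
--     # Step 1: Identify the cells occupied by the figure.
--     figure_positions = []
--
--     for r in range(rows):
--         for c in range(cols):
--             if board[r][c] == '*':
--                 figure_positions.append((r, c))
--
--     # Step 2: Determine obstacles in each column occupied by the figure.
--     min_obstacles_to_remove = float('inf')  # Start with a large number
--
--     # Step 3: Check each column for obstacles.
--     columns_to_check = set(c for _, c in figure_positions)  # Columns where the figure is present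
--
--     for col in columns_to_check:
--         obstacles_count = 0
--
--         # Check all rows in the current column from the bottom up
--         for r in range(rows - 1, -1, -1):
--             if board[r][col] == '#':
--                 obstacles_count += 1  # Count the obstacle
--             elif board[r][col] == '*':
--                 # If we hit a part of the figure, we can stop counting
--                 break
--
--         # Keep track of the minimum obstacles across the columns of the figure
--         min_obstacles_to_remove = min(min_obstacles_to_remove, obstacles_count)
--
--     return min_obstacles_to_remove if min_obstacles_to_remove != float('inf') else 0
-- ===== SOURCE B (Python) =====
-- def _step(s, cell):
--     cnt, best = s
--     if best is not None:
--         return s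
--     if cell == '#':
--         return (cnt + 1, None)
--     if cell == '*':
--         return (cnt, cnt)
--     return s
--
--
-- def solution(board):
--     cols = len(board[0])
--     state = [(0, None)] * cols
--     for row in reversed(board):
--         state = [_step(state[c], row[c]) for c in range(cols)]
--     finals = [b for _, b in state if b is not None]
--     return min(finals) if finals else 0
-- ===== Notes on version B (the rewrite author's own statement) =====
-- stated objective: alternative
-- what changed: B replaces A's figure-position collection plus per-column bottom-up rescans by a single bottom-to-top row sweep maintaining per-column (running '#' count, finalized minimum) state, then takes the minimum of the finalized counts.
import Mathlib
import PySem

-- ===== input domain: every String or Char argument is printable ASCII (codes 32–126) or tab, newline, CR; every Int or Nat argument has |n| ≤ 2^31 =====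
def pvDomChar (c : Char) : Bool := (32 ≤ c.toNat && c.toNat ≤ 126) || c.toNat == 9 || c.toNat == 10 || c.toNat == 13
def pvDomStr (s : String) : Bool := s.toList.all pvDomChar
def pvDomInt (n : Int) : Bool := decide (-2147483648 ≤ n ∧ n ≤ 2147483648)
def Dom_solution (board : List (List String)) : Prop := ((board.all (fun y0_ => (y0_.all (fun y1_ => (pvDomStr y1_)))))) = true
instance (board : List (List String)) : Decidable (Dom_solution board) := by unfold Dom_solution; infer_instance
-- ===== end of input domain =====

-- B replaces A's figure-collection phase plus per-column bottom-up rescans by one bottom-to-top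
-- row sweep maintaining per-column (running count, finalized value) state (objective: alternative).


-- ===== PORT A =====
-- A's inner `for r in range(rows-1,-1,-1): … break` scan: recursion over the reversed row list
-- (first element = bottom row); `board[r][col]` is `getD`, exact on Pre_ (indices in range there).
def countA (rows : List (List String)) (col : Nat) : Int :=
  match rows with
  | [] => 0
  | row :: rest =>
    if row.getD col "" = "#" then 1 + countA rest col
    else if row.getD col "" = "*" then 0
    else countA rest col

def solution (board : List (List String)) : Int :=
  let rows := board.length
  let cols := (board.headD []).length
  let figure_positions := (List.range rows).foldl (fun acc r =>
      (List.range cols).foldl (fun acc2 c =>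
        if (board.getD r []).getD c "" = "*" then acc2 ++ [(r, c)] else acc2) acc) []
  let columns_to_check : PySem.Set Nat := PySem.Set.ofList (figure_positions.map (fun p => p.2))
  -- min_obstacles_to_remove: `none` plays float('inf')
  let m := columns_to_check.foldl (fun (m : Option Int) (col : Nat) =>
      let cnt := countA board.reverse col
      some (match m with | none => cnt | some x => min x cnt)) none
  match m with | none => 0 | some v => v

-- ===== PORT B =====
def cellStepB (s : Int × Option Int) (cell : String) : Int × Option Int :=
  match s.2 with
  | some _ => s
  | none =>
    if cell = "#" then (s.1 + 1, none)
    else if cell = "*" then (s.1, some s.1)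
    else s

def solution_alt (board : List (List String)) : Int :=
  let cols := (board.headD []).length
  let init : List (Int × Option Int) := List.replicate cols (0, none)
  let st := board.reverse.foldl (fun st row =>
      (List.range cols).map (fun c => cellStepB (st.getD c (0, none)) (row.getD c ""))) init
  let finals := st.filterMap (fun p => p.2)
  match PySem.List.min? finals (fun x => x) with
  | some v => v
  | none => 0

-- ===== PRECONDITION & SPEC =====
-- Pre_ excludes exactly the inputs where Python A raises: the empty board (board[0] → IndexError)
-- and boards with a row shorter than row 0 (board[r][c] → IndexError).
def Pre_solution (board : List (List String)) : Prop :=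
  board ≠ [] ∧ ∀ row ∈ board, (board.headD []).length ≤ row.length
instance (board : List (List String)) : Decidable (Pre_solution board) := by
  unfold Pre_solution; infer_instance
def pvWitness_solution : List (List String) := [["*"]]

def Spec_solution (board : List (List String)) (out : Int) : Prop := out = solution_alt board
instance (board : List (List String)) (out : Int) : Decidable (Spec_solution board out) := by unfold Spec_solution; infer_instance

-- ===== CLAIM (what is proved, stated in full; the proofs are below) =====
def Claim_equal_solution : Prop := ∀ (board : List (List String)), Dom_solution board → Pre_solution board → Spec_solution board (solution board)

-- ===== LEMMAS AND PROOFS =====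

-- whether column c of M contains a figure cell
def hasStar (M : List (List String)) (c : Nat) : Bool :=
  M.any (fun row => decide (row.getD c "" = "*"))

-- the per-column state B maintains, described directly in terms of the processed rows M
def colFun (M : List (List String)) (c : Nat) : Int × Option Int :=
  (countA M c, if hasStar M c then some (countA M c) else none)

theorem countA_append_single (M : List (List String)) (row : List String) (c : Nat) :
    countA (M ++ [row]) c =
      if hasStar M c then countA M c
      else countA M c + (if row.getD c "" = "#" then 1 else 0) := by
  induction M with
  | nil =>
    simp only [List.nil_append, countA, hasStar, List.any_nil, Bool.false_eq_true, if_false]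
    split_ifs <;> simp_all
  | cons r rest ih =>
    simp only [List.cons_append, countA, hasStar, List.any_cons, List.getD_eq_getElem?_getD]
      at ih ⊢
    by_cases hh : r[c]?.getD "" = "#"
    · have hns : ¬ r[c]?.getD "" = "*" := by rw [hh]; decide
      simp only [if_pos hh, decide_eq_false hns, Bool.false_or, ih]
      split_ifs <;> ring
    · by_cases hs : r[c]?.getD "" = "*"
      · simp [hs]
      · simp only [if_neg hh, if_neg hs, decide_eq_false hs, Bool.false_or, ih]

theorem hasStar_append_single (M : List (List String)) (row : List String) (c : Nat) :
    hasStar (M ++ [row]) c = (hasStar M c || decide (row.getD c "" = "*")) := by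
  simp [hasStar]

theorem getD_map_range {α : Type} (g : Nat → α) (cols c : Nat) (hc : c < cols) (d : α) :
    ((List.range cols).map g).getD c d = g c := by
  rw [List.getD_eq_getElem?_getD]
  simp [hc]

-- B's fold invariant
theorem foldB_eq (M : List (List String)) (cols : Nat) :
    M.foldl (fun st row =>
      (List.range cols).map (fun c => cellStepB (st.getD c (0, none)) (row.getD c "")))
      (List.replicate cols ((0 : Int), (none : Option Int)))
    = (List.range cols).map (colFun M) := by
  induction M using List.reverseRecOn with
  | nil =>
    simp only [List.foldl_nil]
    apply List.ext_getElem <;> simp [colFun, countA, hasStar]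
  | append_singleton M row ih =>
    rw [List.foldl_append, List.foldl_cons, List.foldl_nil, ih]
    apply List.map_congr_left
    intro c hc
    rw [List.mem_range] at hc
    rw [getD_map_range _ _ _ hc]
    simp only [colFun, cellStepB, countA_append_single, hasStar_append_single]
    rcases hst : hasStar M c with _ | _
    · simp only [Bool.false_eq_true, if_false, Bool.false_or]
      split_ifs <;> simp_all
    · simp only [if_true, Bool.true_or]

theorem filterMap_colFun (M : List (List String)) (cols : Nat) :
    ((List.range cols).map (colFun M)).filterMap (fun p => p.2)
    = ((List.range cols).filter (fun c => hasStar M c)).map (countA M) := by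
  induction List.range cols with
  | nil => rfl
  | cons c t ih =>
    simp only [List.map_cons, List.filterMap_cons, List.filter_cons, colFun]
    rcases hst : hasStar M c with _ | _ <;> simp [ih]

-- A's running-min fold over a list of columns
theorem foldA_some (M : List (List String)) (l : List Nat) (a : Int) :
    l.foldl (fun (m : Option Int) (col : Nat) =>
        some (match m with | none => countA M col | some x => min x (countA M col))) (some a)
    = some ((l.map (countA M)).foldl min a) := by
  induction l generalizing a with
  | nil => rfl
  | cons c t ih => simp only [List.foldl_cons, List.map_cons]; exact ih _

theorem min?_congr_mem (l₁ l₂ : List Int) (h : ∀ x, x ∈ l₁ ↔ x ∈ l₂) :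
    l₁.min? = l₂.min? := by
  rcases hm : l₁.min? with _ | a
  · rw [List.min?_eq_none_iff] at hm
    subst hm
    rcases hl : l₂ with _ | ⟨x, t⟩
    · rfl
    · exact absurd ((h x).mpr (by simp [hl])) (by simp)
  · rw [List.min?_eq_some_iff] at hm
    rw [eq_comm, List.min?_eq_some_iff]
    exact ⟨(h a).mp hm.1, fun b hb => hm.2 b ((h b).mpr hb)⟩

-- membership of A's column set
theorem mem_colsA (board : List (List String)) (c : Nat) :
    (c ∈ (((List.range board.length).foldl (fun acc r =>
        (List.range (board.headD []).length).foldl (fun acc2 c' =>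
          if (board.getD r []).getD c' "" = "*" then acc2 ++ [(r, c')] else acc2) acc) []).map
          (fun p => p.2)))
    ↔ (c < (board.headD []).length ∧ hasStar board c = true) := by
  simp only [PySem.List.foldl_append_ite (fun c' => (_ : List String).getD c' "" = "*")
      (fun c' => (_, c')), PySem.List.foldl_append_eq_flatMap]
  rw [List.nil_append]
  simp only [List.mem_map, List.mem_flatMap, List.mem_filter, List.mem_range, hasStar,
    List.any_eq_true]
  constructor
  · intro h
    obtain ⟨p, hp, rfl⟩ := h
    obtain ⟨r, hr, c', ⟨hc', hstar⟩, heq⟩ := hp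
    cases heq
    have hbr : board.getD r [] = board[r] := by
      rw [List.getD_eq_getElem?_getD, List.getElem?_eq_getElem hr, Option.getD_some]
    rw [hbr] at hstar
    exact ⟨hc', ⟨board[r], List.getElem_mem hr, hstar⟩⟩
  · rintro ⟨hc, row, hrow, hst⟩
    obtain ⟨r, hr, hrowr⟩ := List.mem_iff_getElem.mp hrow
    refine ⟨(r, c), ⟨r, hr, c, ⟨hc, ?_⟩, rfl⟩, rfl⟩
    have hbr : board.getD r [] = row := by
      rw [List.getD_eq_getElem?_getD, List.getElem?_eq_getElem hr, Option.getD_some, hrowr]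
    rw [hbr]
    exact hst

theorem pymin_eq_core (l : List Int) : PySem.List.min? l (fun y => y) = l.min? := by
  cases l with
  | nil => rfl
  | cons x t => rw [PySem.List.min?_id_cons]; simp [List.min?]

theorem hasStar_reverse (M : List (List String)) (c : Nat) :
    hasStar M.reverse c = hasStar M c := by
  simp [hasStar]

-- ===== VERDICT (by name: the statement is the Claim_ definition above) =====
theorem solution_spec : Claim_equal_solution := by
  intro board _ _
  unfold Spec_solution
  simp only [solution, solution_alt]
  rw [foldB_eq, filterMap_colFun]
  set cols := (board.headD []).length with hcols
  set v := countA board.reverse with hv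
  set LA := PySem.Set.ofList (((List.range board.length).foldl (fun acc r =>
      (List.range cols).foldl (fun acc2 c' =>
        if (board.getD r []).getD c' "" = "*" then acc2 ++ [(r, c')] else acc2) acc) []).map
        (fun p => p.2)) with hLA
  have hmemLA : ∀ c, c ∈ LA ↔ (c < cols ∧ hasStar board c = true) := by
    intro c
    rw [hLA, PySem.Set.mem_ofList]
    exact mem_colsA board c
  set finals := ((List.range cols).filter (fun c => hasStar board.reverse c)).map v with hfin
  have hmemfin : ∀ x, x ∈ finals ↔ ∃ c, (c < cols ∧ hasStar board c = true) ∧ v c = x := by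
    intro x
    rw [hfin]
    simp only [List.mem_map, List.mem_filter, List.mem_range, hasStar_reverse]
  rcases hla : LA with _ | ⟨c0, t⟩
  · have hfe : finals = [] := by
      rcases hfe : finals with _ | ⟨x, t'⟩
      · rfl
      · exfalso
        obtain ⟨c, hc, _⟩ := (hmemfin x).mp (by rw [hfe]; simp)
        have := (hmemLA c).mpr hc
        rw [hla] at this
        simp at this
    rw [hfe]
    rfl
  · have h1 : (c0 :: t).foldl (fun (m : Option Int) (col : Nat) =>
        some (match m with | none => v col | some x => min x (v col))) none
        = some ((t.map v).foldl min (v c0)) := by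
      rw [List.foldl_cons]
      have := foldA_some board.reverse t (v c0)
      rw [← hv] at this
      rw [this]
    have hx : ∀ x, x ∈ (c0 :: t).map v ↔ x ∈ finals := by
      intro x
      rw [hmemfin x]
      simp only [List.mem_map]
      constructor
      · rintro ⟨c, hc, h3⟩
        refine ⟨c, (hmemLA c).mp ?_, h3⟩
        rw [hla]
        exact hc
      · rintro ⟨c, hc, h3⟩
        have hmem := (hmemLA c).mpr hc
        rw [hla] at hmem
        exact ⟨c, hmem, h3⟩
    have hmin : ((c0 :: t).map v).min? = finals.min? := min?_congr_mem _ _ hx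
    rw [h1, pymin_eq_core, ← hmin]
    simp [List.min?]
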